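-- pv_equiv track=rewrite | github.com/fatguylilcoat98/lylo-mechanic | claspion/witness.py | _extract_unstated_implications
-- ===== SOURCE A (Python) =====
-- from typing import Dict, List, Tuple, Optional
--
-- def _extract_unstated_implications(
--     reasoning: str, decision: str
-- ) -> List[str]:
--     """
--     Detect actions that have side effects not mentioned in reasoning.
--
--     Returns:
--         List of unstated implications
--     """
--     implications = []
--     reasoning_lower = reasoning.lower()
--     decision_lower = decision.lower()
--
--     # Pattern: database deletions should be justified
--     if "delete" in decision_lower and "delete" not in reasoning_lower:
--         implications.append("Deletion not justified in reasoning")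
--
--     # Pattern: data exports should be intentional
--     if any(word in decision_lower for word in ["export", "send", "transmit"]):
--         if "export" not in reasoning_lower and "send" not in reasoning_lower:
--             implications.append("Data movement not mentioned in reasoning")
--
--     # Pattern: modification should be intentional
--     if "modify" in decision_lower and "modify" not in reasoning_lower:
--         implications.append("Modification not explicitly justified")
--
--     # Pattern: external communication should be deliberate
--     if "email" in decision_lower and "email" not in reasoning_lower:
--         implications.append("Email/communication not part of stated reasoning")
--
--     # Pattern: access changes should be intentional
--     if any(word in decision_lower for word in ["grant", "revoke", "access", "permission"]):
--         if "permission" not in reasoning_lower and "access" not in reasoning_lower: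
--             implications.append("Access changes not explicitly discussed")
--
--     return implications
-- ===== SOURCE B (Python) =====
-- from typing import List
--
-- # Inverted index: keyword -> category id, one map for decision triggers,
-- # one for reasoning blockers; messages indexed by category.
-- _TRIGGERS = {
--     "delete": 0,
--     "export": 1, "send": 1, "transmit": 1,
--     "modify": 2,
--     "email": 3,
--     "grant": 4, "revoke": 4, "access": 4, "permission": 4,
-- }
-- _BLOCKERS = {
--     "delete": 0,
--     "export": 1, "send": 1,
--     "modify": 2,
--     "email": 3,
--     "permission": 4, "access": 4,
-- }
-- _MESSAGES = [
--     "Deletion not justified in reasoning",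
--     "Data movement not mentioned in reasoning",
--     "Modification not explicitly justified",
--     "Email/communication not part of stated reasoning",
--     "Access changes not explicitly discussed",
-- ]
--
-- def _extract_unstated_implications(reasoning: str, decision: str) -> List[str]:
--     decision_lower = decision.lower()
--     reasoning_lower = reasoning.lower()
--     triggered = {cat for kw, cat in _TRIGGERS.items() if kw in decision_lower}
--     blocked = {cat for kw, cat in _BLOCKERS.items() if kw in reasoning_lower}
--     return [_MESSAGES[cat] for cat in sorted(triggered - blocked)]
-- ===== Notes on version B (the rewrite author's own statement) =====
-- stated objective: alternative
-- what changed: Replaces the five inline rule branches with an inverted keyword-to-category index: one pass builds the set of triggered categories from the decision, another the set of blocked categories from the reasoning, and messages are emitted for the sorted set difference.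
import Mathlib
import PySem

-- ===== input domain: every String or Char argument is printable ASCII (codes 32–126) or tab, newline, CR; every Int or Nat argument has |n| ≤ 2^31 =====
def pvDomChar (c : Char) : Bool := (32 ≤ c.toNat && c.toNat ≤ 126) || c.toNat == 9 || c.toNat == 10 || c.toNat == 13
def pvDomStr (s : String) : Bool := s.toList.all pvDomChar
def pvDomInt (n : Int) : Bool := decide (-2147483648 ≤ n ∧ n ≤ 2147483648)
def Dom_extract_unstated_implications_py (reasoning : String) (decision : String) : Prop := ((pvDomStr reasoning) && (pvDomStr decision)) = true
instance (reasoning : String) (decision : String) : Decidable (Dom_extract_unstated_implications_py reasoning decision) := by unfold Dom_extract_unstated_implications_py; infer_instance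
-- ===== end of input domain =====

-- B inverts the rule structure: keyword→category maps, two set-building passes, then messages for the sorted set difference.
-- ===== PORT A =====
def extract_unstated_implications_py (reasoning : String) (decision : String) : List String :=
  let implications : List String := []
  let rl := PySem.Str.lower reasoning
  let dl := PySem.Str.lower decision
  let implications := if PySem.Str.isIn "delete" dl && !(PySem.Str.isIn "delete" rl) then
      implications ++ ["Deletion not justified in reasoning"] else implications
  let implications := if ["export", "send", "transmit"].any (fun w => PySem.Str.isIn w dl) then
      (if !(PySem.Str.isIn "export" rl) && !(PySem.Str.isIn "send" rl) then
        implications ++ ["Data movement not mentioned in reasoning"] else implications)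
    else implications
  let implications := if PySem.Str.isIn "modify" dl && !(PySem.Str.isIn "modify" rl) then
      implications ++ ["Modification not explicitly justified"] else implications
  let implications := if PySem.Str.isIn "email" dl && !(PySem.Str.isIn "email" rl) then
      implications ++ ["Email/communication not part of stated reasoning"] else implications
  let implications := if ["grant", "revoke", "access", "permission"].any (fun w => PySem.Str.isIn w dl) then
      (if !(PySem.Str.isIn "permission" rl) && !(PySem.Str.isIn "access" rl) then
        implications ++ ["Access changes not explicitly discussed"] else implications)
    else implications
  implications

-- ===== PORT B =====
def pvTriggers : List (String × Nat) :=
  [("delete", 0), ("export", 1), ("send", 1), ("transmit", 1), ("modify", 2),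
   ("email", 3), ("grant", 4), ("revoke", 4), ("access", 4), ("permission", 4)]
def pvBlockers : List (String × Nat) :=
  [("delete", 0), ("export", 1), ("send", 1), ("modify", 2), ("email", 3),
   ("permission", 4), ("access", 4)]
def pvMessages : List String :=
  ["Deletion not justified in reasoning",
   "Data movement not mentioned in reasoning",
   "Modification not explicitly justified",
   "Email/communication not part of stated reasoning",
   "Access changes not explicitly discussed"]

def extract_unstated_implications_py_alt (reasoning : String) (decision : String) : List String :=
  let dl := PySem.Str.lower decision
  let rl := PySem.Str.lower reasoning
  let triggered : PySem.Set Nat :=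
    PySem.Set.ofList (pvTriggers.filterMap (fun p => if PySem.Str.isIn p.1 dl then some p.2 else none))
  let blocked : PySem.Set Nat :=
    PySem.Set.ofList (pvBlockers.filterMap (fun p => if PySem.Str.isIn p.1 rl then some p.2 else none))
  -- _MESSAGES[cat]: cat is always 0..4, in range; getD is exact there
  (PySem.List.sorted (PySem.Set.diff triggered blocked) (fun x => x) false).map
    (fun cat => pvMessages.getD cat "")

-- ===== PRECONDITION & SPEC =====
def Spec_extract_unstated_implications_py (reasoning : String) (decision : String) (out : List String) : Prop := out = extract_unstated_implications_py_alt reasoning decision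
instance (reasoning : String) (decision : String) (out : List String) : Decidable (Spec_extract_unstated_implications_py reasoning decision out) := by unfold Spec_extract_unstated_implications_py; infer_instance

-- ===== CLAIM (what is proved, stated in full; the proofs are below) =====
def Claim_equal_extract_unstated_implications_py : Prop := ∀ (reasoning : String) (decision : String), Dom_extract_unstated_implications_py reasoning decision → Spec_extract_unstated_implications_py reasoning decision (extract_unstated_implications_py reasoning decision)

-- ===== LEMMAS AND PROOFS =====
def pvNatIf (b : Bool) (n : Nat) : List Nat := if b then [n] else []
def pvCatIf (t b : Bool) (m : String) : List String := if t && !b then [m] else []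

theorem pv_setT (dl : String) :
    PySem.Set.ofList (pvTriggers.filterMap (fun p => if PySem.Str.isIn p.1 dl then some p.2 else none)) =
      pvNatIf (PySem.Str.isIn "delete" dl) 0 ++
      pvNatIf (PySem.Str.isIn "export" dl || (PySem.Str.isIn "send" dl || PySem.Str.isIn "transmit" dl)) 1 ++
      pvNatIf (PySem.Str.isIn "modify" dl) 2 ++
      pvNatIf (PySem.Str.isIn "email" dl) 3 ++
      pvNatIf (PySem.Str.isIn "grant" dl || (PySem.Str.isIn "revoke" dl || (PySem.Str.isIn "access" dl || PySem.Str.isIn "permission" dl))) 4 := by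
  unfold pvTriggers
  simp only [List.filterMap_cons, List.filterMap_nil]
  generalize PySem.Str.isIn "delete" dl = d1
  generalize PySem.Str.isIn "export" dl = d2
  generalize PySem.Str.isIn "send" dl = d3
  generalize PySem.Str.isIn "transmit" dl = d4
  generalize PySem.Str.isIn "modify" dl = d5
  generalize PySem.Str.isIn "email" dl = d6
  generalize PySem.Str.isIn "grant" dl = d7
  generalize PySem.Str.isIn "revoke" dl = d8
  generalize PySem.Str.isIn "access" dl = d9
  generalize PySem.Str.isIn "permission" dl = d10
  revert d1 d2 d3 d4 d5 d6 d7 d8 d9 d10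
  decide

theorem pv_setB (rl : String) :
    PySem.Set.ofList (pvBlockers.filterMap (fun p => if PySem.Str.isIn p.1 rl then some p.2 else none)) =
      pvNatIf (PySem.Str.isIn "delete" rl) 0 ++
      pvNatIf (PySem.Str.isIn "export" rl || PySem.Str.isIn "send" rl) 1 ++
      pvNatIf (PySem.Str.isIn "modify" rl) 2 ++
      pvNatIf (PySem.Str.isIn "email" rl) 3 ++
      pvNatIf (PySem.Str.isIn "permission" rl || PySem.Str.isIn "access" rl) 4 := by
  unfold pvBlockers
  simp only [List.filterMap_cons, List.filterMap_nil]
  generalize PySem.Str.isIn "delete" rl = r1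
  generalize PySem.Str.isIn "export" rl = r2
  generalize PySem.Str.isIn "send" rl = r3
  generalize PySem.Str.isIn "modify" rl = r4
  generalize PySem.Str.isIn "email" rl = r5
  generalize PySem.Str.isIn "permission" rl = r6
  generalize PySem.Str.isIn "access" rl = r7
  revert r1 r2 r3 r4 r5 r6 r7
  decide

theorem pv_sortmap (t0 t1 t2 t3 t4 b0 b1 b2 b3 b4 : Bool) :
    (PySem.List.sorted
        (PySem.Set.diff (pvNatIf t0 0 ++ pvNatIf t1 1 ++ pvNatIf t2 2 ++ pvNatIf t3 3 ++ pvNatIf t4 4)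
                        (pvNatIf b0 0 ++ pvNatIf b1 1 ++ pvNatIf b2 2 ++ pvNatIf b3 3 ++ pvNatIf b4 4))
        (fun x => x) false).map (fun cat => pvMessages.getD cat "") =
      pvCatIf t0 b0 "Deletion not justified in reasoning" ++
      pvCatIf t1 b1 "Data movement not mentioned in reasoning" ++
      pvCatIf t2 b2 "Modification not explicitly justified" ++
      pvCatIf t3 b3 "Email/communication not part of stated reasoning" ++
      pvCatIf t4 b4 "Access changes not explicitly discussed" := by
  revert t0 t1 t2 t3 t4 b0 b1 b2 b3 b4
  decide

theorem pv_B_eq (reasoning decision : String) :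
    extract_unstated_implications_py_alt reasoning decision =
      pvCatIf (PySem.Str.isIn "delete" (PySem.Str.lower decision)) (PySem.Str.isIn "delete" (PySem.Str.lower reasoning)) "Deletion not justified in reasoning" ++
      pvCatIf (PySem.Str.isIn "export" (PySem.Str.lower decision) || (PySem.Str.isIn "send" (PySem.Str.lower decision) || PySem.Str.isIn "transmit" (PySem.Str.lower decision)))
              (PySem.Str.isIn "export" (PySem.Str.lower reasoning) || PySem.Str.isIn "send" (PySem.Str.lower reasoning)) "Data movement not mentioned in reasoning" ++
      pvCatIf (PySem.Str.isIn "modify" (PySem.Str.lower decision)) (PySem.Str.isIn "modify" (PySem.Str.lower reasoning)) "Modification not explicitly justified" ++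
      pvCatIf (PySem.Str.isIn "email" (PySem.Str.lower decision)) (PySem.Str.isIn "email" (PySem.Str.lower reasoning)) "Email/communication not part of stated reasoning" ++
      pvCatIf (PySem.Str.isIn "grant" (PySem.Str.lower decision) || (PySem.Str.isIn "revoke" (PySem.Str.lower decision) || (PySem.Str.isIn "access" (PySem.Str.lower decision) || PySem.Str.isIn "permission" (PySem.Str.lower decision))))
              (PySem.Str.isIn "permission" (PySem.Str.lower reasoning) || PySem.Str.isIn "access" (PySem.Str.lower reasoning)) "Access changes not explicitly discussed" := by
  show (PySem.List.sorted
        (PySem.Set.diff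
          (PySem.Set.ofList (pvTriggers.filterMap (fun p => if PySem.Str.isIn p.1 (PySem.Str.lower decision) then some p.2 else none)))
          (PySem.Set.ofList (pvBlockers.filterMap (fun p => if PySem.Str.isIn p.1 (PySem.Str.lower reasoning) then some p.2 else none))))
        (fun x => x) false).map (fun cat => pvMessages.getD cat "") = _
  rw [pv_setT, pv_setB, pv_sortmap]

theorem pv_A_eq (reasoning decision : String) :
    extract_unstated_implications_py reasoning decision =
      pvCatIf (PySem.Str.isIn "delete" (PySem.Str.lower decision)) (PySem.Str.isIn "delete" (PySem.Str.lower reasoning)) "Deletion not justified in reasoning" ++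
      pvCatIf (PySem.Str.isIn "export" (PySem.Str.lower decision) || (PySem.Str.isIn "send" (PySem.Str.lower decision) || PySem.Str.isIn "transmit" (PySem.Str.lower decision)))
              (PySem.Str.isIn "export" (PySem.Str.lower reasoning) || PySem.Str.isIn "send" (PySem.Str.lower reasoning)) "Data movement not mentioned in reasoning" ++
      pvCatIf (PySem.Str.isIn "modify" (PySem.Str.lower decision)) (PySem.Str.isIn "modify" (PySem.Str.lower reasoning)) "Modification not explicitly justified" ++
      pvCatIf (PySem.Str.isIn "email" (PySem.Str.lower decision)) (PySem.Str.isIn "email" (PySem.Str.lower reasoning)) "Email/communication not part of stated reasoning" ++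
      pvCatIf (PySem.Str.isIn "grant" (PySem.Str.lower decision) || (PySem.Str.isIn "revoke" (PySem.Str.lower decision) || (PySem.Str.isIn "access" (PySem.Str.lower decision) || PySem.Str.isIn "permission" (PySem.Str.lower decision))))
              (PySem.Str.isIn "permission" (PySem.Str.lower reasoning) || PySem.Str.isIn "access" (PySem.Str.lower reasoning)) "Access changes not explicitly discussed" := by
  unfold extract_unstated_implications_py
  simp only [List.any_cons, List.any_nil, Bool.or_false, ← Bool.not_or]
  generalize PySem.Str.isIn "delete" (PySem.Str.lower decision) = t0
  generalize (PySem.Str.isIn "export" (PySem.Str.lower decision) || (PySem.Str.isIn "send" (PySem.Str.lower decision) || PySem.Str.isIn "transmit" (PySem.Str.lower decision))) = t1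
  generalize PySem.Str.isIn "modify" (PySem.Str.lower decision) = t2
  generalize PySem.Str.isIn "email" (PySem.Str.lower decision) = t3
  generalize (PySem.Str.isIn "grant" (PySem.Str.lower decision) || (PySem.Str.isIn "revoke" (PySem.Str.lower decision) || (PySem.Str.isIn "access" (PySem.Str.lower decision) || PySem.Str.isIn "permission" (PySem.Str.lower decision)))) = t4
  generalize PySem.Str.isIn "delete" (PySem.Str.lower reasoning) = b0
  generalize (PySem.Str.isIn "export" (PySem.Str.lower reasoning) || PySem.Str.isIn "send" (PySem.Str.lower reasoning)) = b1
  generalize PySem.Str.isIn "modify" (PySem.Str.lower reasoning) = b2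
  generalize PySem.Str.isIn "email" (PySem.Str.lower reasoning) = b3
  generalize (PySem.Str.isIn "permission" (PySem.Str.lower reasoning) || PySem.Str.isIn "access" (PySem.Str.lower reasoning)) = b4
  revert t0 t1 t2 t3 t4 b0 b1 b2 b3 b4
  decide

-- ===== VERDICT (by name: the statement is the Claim_ definition above) =====
theorem extract_unstated_implications_py_spec : Claim_equal_extract_unstated_implications_py := by
  intro reasoning decision _
  unfold Spec_extract_unstated_implications_py
  rw [pv_A_eq, pv_B_eq]
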